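-- pv_equiv track=rewrite | github.com/Jorza/python-useful-codes | Greedy Prim's.py | get_unique_vertices
-- ===== SOURCE A (Python) =====
-- def get_unique_vertices(edge_list):
--     vertices = []
--     for each in edge_list:
--         if each[0] not in vertices:
--             vertices.append(each[0])
--         try:
--             if each[1] not in vertices:
--                 vertices.append(each[1])
--         except IndexError:
--             pass
--     return vertices
-- ===== SOURCE B (Python) =====
-- def get_unique_vertices(edge_list):
--     # Two passes: flatten the first two entries of every edge, then dedup
--     # preserving first-occurrence order.
--     flat = []
--     for each in edge_list:
--         flat.append(each[0])
--         try:
--             flat.append(each[1])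
--         except IndexError:
--             pass
--     result = []
--     for v in flat:
--         if v not in result:
--             result.append(v)
--     return result
-- ===== Notes on version B (the rewrite author's own statement) =====
-- stated objective: simpler
-- what changed: Replaced the single interleaved collect+dedup loop by two plain passes: flatten every edge's first two vertices into one list, then dedup that list preserving first-occurrence order.
import Mathlib
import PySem

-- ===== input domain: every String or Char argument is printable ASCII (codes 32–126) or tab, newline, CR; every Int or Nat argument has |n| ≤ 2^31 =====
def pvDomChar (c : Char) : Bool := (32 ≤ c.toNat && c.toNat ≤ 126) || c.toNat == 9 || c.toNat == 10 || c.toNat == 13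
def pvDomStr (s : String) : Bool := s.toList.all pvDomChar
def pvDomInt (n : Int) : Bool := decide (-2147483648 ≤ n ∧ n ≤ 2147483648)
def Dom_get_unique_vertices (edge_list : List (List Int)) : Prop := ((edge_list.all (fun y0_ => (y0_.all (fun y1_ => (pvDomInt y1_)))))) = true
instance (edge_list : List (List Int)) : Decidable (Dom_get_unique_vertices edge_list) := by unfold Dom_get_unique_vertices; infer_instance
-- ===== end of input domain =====

-- B collects the same vertices in two plain passes (flatten then order-preserving dedup) instead of A's interleaved loop; return value proved equal on edge lists with no empty edge (A raises IndexError there).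
-- ===== PORT A =====
-- Single pass: for each edge, dedup-insert each[0] (unguarded IndexError),
-- then dedup-insert each[1] (IndexError caught: skipped).
def get_unique_vertices (edge_list : List (List Int)) : List Int :=
  edge_list.foldl (fun vertices each =>
    match PySem.List.pyGet? each 0 with
    | none => vertices  -- unreachable under Pre_ (each[0] raises IndexError)
    | some v0 =>
      let vertices := if v0 ∈ vertices then vertices else vertices ++ [v0]
      match PySem.List.pyGet? each 1 with
      | none => vertices  -- except IndexError: pass
      | some v1 => if v1 ∈ vertices then vertices else vertices ++ [v1]) []

-- ===== PORT B =====
-- Two passes: flatten each edge's first two entries, then dedup preserving order.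
def get_unique_vertices_alt (edge_list : List (List Int)) : List Int :=
  let flat := edge_list.foldl (fun acc each =>
    match PySem.List.pyGet? each 0 with
    | none => acc  -- unreachable under Pre_
    | some v0 =>
      match PySem.List.pyGet? each 1 with
      | none => acc ++ [v0]
      | some v1 => acc ++ [v0, v1]) []
  flat.foldl (fun res v => if v ∈ res then res else res ++ [v]) []

-- ===== PRECONDITION & SPEC =====
-- Pre_ excludes edges that are empty lists: there A raises IndexError on each[0].
def Pre_get_unique_vertices (edge_list : List (List Int)) : Prop :=
  ∀ each ∈ edge_list, each ≠ []
instance (edge_list : List (List Int)) : Decidable (Pre_get_unique_vertices edge_list) := by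
  unfold Pre_get_unique_vertices; infer_instance
def pvWitness_get_unique_vertices : List (List Int) := [[1, 2], [2, 3], [1, 3]]
def Spec_get_unique_vertices (edge_list : List (List Int)) (out : List Int) : Prop := out = get_unique_vertices_alt edge_list
instance (edge_list : List (List Int)) (out : List Int) : Decidable (Spec_get_unique_vertices edge_list out) := by unfold Spec_get_unique_vertices; infer_instance

-- ===== CLAIM (what is proved, stated in full; the proofs are below) =====
def Claim_equal_get_unique_vertices : Prop := ∀ (edge_list : List (List Int)), Dom_get_unique_vertices edge_list → Pre_get_unique_vertices edge_list → Spec_get_unique_vertices edge_list (get_unique_vertices edge_list)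

-- ===== LEMMAS AND PROOFS =====
-- The per-edge contribution: the list of vertices an edge feeds into the dedup.
def pvEdgeVerts (each : List Int) : List Int :=
  match PySem.List.pyGet? each 0 with
  | none => []
  | some v0 =>
    match PySem.List.pyGet? each 1 with
    | none => [v0]
    | some v1 => [v0, v1]

def pvIns (res : List Int) (v : Int) : List Int :=
  if v ∈ res then res else res ++ [v]

-- A's per-edge step is folding pvIns over that edge's contribution.
theorem pvStepA (vertices each : List Int) :
    (match PySem.List.pyGet? each 0 with
     | none => vertices
     | some v0 =>
       let vertices := if v0 ∈ vertices then vertices else vertices ++ [v0]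
       match PySem.List.pyGet? each 1 with
       | none => vertices
       | some v1 => if v1 ∈ vertices then vertices else vertices ++ [v1]) =
    (pvEdgeVerts each).foldl pvIns vertices := by
  unfold pvEdgeVerts
  cases PySem.List.pyGet? each 0 with
  | none => simp
  | some v0 =>
    cases PySem.List.pyGet? each 1 with
    | none => simp [pvIns]
    | some v1 => simp [pvIns]

-- B's flat pass appends each edge's contribution.
theorem pvStepB (acc each : List Int) :
    (match PySem.List.pyGet? each 0 with
     | none => acc
     | some v0 =>
       match PySem.List.pyGet? each 1 with
       | none => acc ++ [v0]
       | some v1 => acc ++ [v0, v1]) =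
    acc ++ pvEdgeVerts each := by
  unfold pvEdgeVerts
  cases PySem.List.pyGet? each 0 with
  | none => simp
  | some v0 => cases PySem.List.pyGet? each 1 with
    | none => rfl
    | some v1 => rfl

theorem pvFlatEq (edge_list : List (List Int)) (acc : List Int) :
    edge_list.foldl (fun acc each =>
      match PySem.List.pyGet? each 0 with
      | none => acc
      | some v0 =>
        match PySem.List.pyGet? each 1 with
        | none => acc ++ [v0]
        | some v1 => acc ++ [v0, v1]) acc = acc ++ edge_list.flatMap pvEdgeVerts := by
  induction edge_list generalizing acc with
  | nil => simp
  | cons e es ih =>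
    simp only [List.foldl_cons, List.flatMap_cons]
    rw [pvStepB, ih, List.append_assoc]

theorem pvMainEq (edge_list : List (List Int)) (vertices : List Int) :
    edge_list.foldl (fun vertices each =>
      match PySem.List.pyGet? each 0 with
      | none => vertices
      | some v0 =>
        let vertices := if v0 ∈ vertices then vertices else vertices ++ [v0]
        match PySem.List.pyGet? each 1 with
        | none => vertices
        | some v1 => if v1 ∈ vertices then vertices else vertices ++ [v1]) vertices =
    (edge_list.flatMap pvEdgeVerts).foldl pvIns vertices := by
  induction edge_list generalizing vertices with
  | nil => simp
  | cons e es ih =>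
    simp only [List.foldl_cons, List.flatMap_cons, List.foldl_append]
    rw [pvStepA, ih]

-- ===== VERDICT (by name: the statement is the Claim_ definition above) =====
theorem get_unique_vertices_spec : Claim_equal_get_unique_vertices := by
  intro edge_list _ _
  unfold Spec_get_unique_vertices get_unique_vertices get_unique_vertices_alt
  rw [pvMainEq, pvFlatEq]
  simp only [List.nil_append]
  rfl
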